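-- pv_equiv track=rewrite | github.com/OskarBartoszyk/HacathonNask | herbert-tuning.py | prepare_stratify_labels
-- ===== SOURCE A (Python) =====
-- from collections import Counter
--
-- def prepare_stratify_labels(labels, min_count=2):
--     label_counts = Counter(labels)
--     stratify_safe = []
--
--     for label in labels:
--         if label_counts[label] < min_count:
--             stratify_safe.append('RARE_CLASS')
--         else:
--             stratify_safe.append(label)
--
--     return stratify_safe
-- ===== SOURCE B (Python) =====
-- def prepare_stratify_labels(labels, min_count=2):
--     # Sort-then-scan: one run-length pass over sorted(labels) collects the rare
--     # labels (run shorter than min_count) into a set, then a map pass rewrites.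
--     rare = set()
--     run_label, run_len = None, 0
--     for x in sorted(labels):
--         if x == run_label:
--             run_len += 1
--         else:
--             if 0 < run_len < min_count:
--                 rare.add(run_label)
--             run_label, run_len = x, 1
--     if 0 < run_len < min_count:
--         rare.add(run_label)
--     return ['RARE_CLASS' if x in rare else x for x in labels]
-- ===== Notes on version B (the rewrite author's own statement) =====
-- stated objective: alternative
-- what changed: Replaces the Counter frequency table with sort-then-scan: a run-length pass over sorted(labels) collects rare labels into a set, then a map pass rewrites them.
import Mathlib
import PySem

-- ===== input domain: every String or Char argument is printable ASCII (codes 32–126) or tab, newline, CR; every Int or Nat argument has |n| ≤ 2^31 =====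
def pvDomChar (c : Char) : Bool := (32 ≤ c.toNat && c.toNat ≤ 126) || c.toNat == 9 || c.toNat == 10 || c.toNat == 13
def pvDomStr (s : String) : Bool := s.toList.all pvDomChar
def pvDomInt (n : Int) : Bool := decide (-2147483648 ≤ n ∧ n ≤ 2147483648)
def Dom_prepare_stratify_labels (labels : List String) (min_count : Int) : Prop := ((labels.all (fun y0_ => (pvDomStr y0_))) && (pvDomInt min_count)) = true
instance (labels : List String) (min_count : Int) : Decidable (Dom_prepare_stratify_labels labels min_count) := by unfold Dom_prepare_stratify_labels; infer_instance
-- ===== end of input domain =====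

-- B replaces A's Counter table by sort-then-run-length-scan collecting the rare labels into a set (alternative algorithm; not faster).

-- ===== PORT A =====
def prepare_stratify_labels (labels : List String) (min_count : Int) : List String :=
  let label_counts := PySem.Dict.counter labels
  let stratify_safe : List String := []
  let stratify_safe := labels.foldl
    (fun acc label =>
      if label_counts.getD label 0 < min_count then acc ++ ["RARE_CLASS"]
      else acc ++ [label]) stratify_safe
  stratify_safe

-- ===== PORT B =====
-- loop state: (rare, run_label, run_len)
def pvStep (min_count : Int) (st : PySem.Set String × Option String × Int) (x : String) :
    PySem.Set String × Option String × Int :=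
  if some x == st.2.1 then (st.1, st.2.1, st.2.2 + 1)
  else
    -- flush the finished run; rare.add(run_label): run_label is a string whenever 0 < run_len, so getD "" is never used
    let rare := if 0 < st.2.2 ∧ st.2.2 < min_count then st.1.add (st.2.1.getD "") else st.1
    (rare, some x, 1)

def pvFlush (min_count : Int) (st : PySem.Set String × Option String × Int) : PySem.Set String :=
  if 0 < st.2.2 ∧ st.2.2 < min_count then st.1.add (st.2.1.getD "") else st.1

def prepare_stratify_labels_alt (labels : List String) (min_count : Int) : List String :=
  let st := (PySem.List.sorted labels (fun x => x) false).foldl (pvStep min_count)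
      (PySem.Set.ofList [], none, 0)
  let rare := pvFlush min_count st
  labels.map (fun x => if rare.contains x then "RARE_CLASS" else x)

-- ===== PRECONDITION & SPEC =====
def Spec_prepare_stratify_labels (labels : List String) (min_count : Int) (out : List String) : Prop := out = prepare_stratify_labels_alt labels min_count
instance (labels : List String) (min_count : Int) (out : List String) : Decidable (Spec_prepare_stratify_labels labels min_count out) := by unfold Spec_prepare_stratify_labels; infer_instance

-- ===== CLAIM (what is proved, stated in full; the proofs are below) =====
def Claim_equal_prepare_stratify_labels : Prop := ∀ (labels : List String) (min_count : Int), Dom_prepare_stratify_labels labels min_count → Spec_prepare_stratify_labels labels min_count (prepare_stratify_labels labels min_count)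

-- ===== LEMMAS AND PROOFS =====

-- invariant of the run-length scan on a sorted tail s: currently inside a run of label a of length c
theorem pv_run_invariant (mc : Int) (s : List String) (hs : s.Pairwise (· ≤ ·))
    (a : String) (c : Int) (hc : 1 ≤ c) (ha : ∀ y ∈ s, a ≤ y) (rare : PySem.Set String) (x : String) :
    (x ∈ pvFlush mc (s.foldl (pvStep mc) (rare, some a, c)) ↔
      x ∈ rare ∨ (x = a ∧ c + (s.count a : Int) < mc) ∨ (x ∈ s ∧ x ≠ a ∧ (s.count x : Int) < mc)) := by
  induction s generalizing a c rare with
  | nil =>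
      have h0 : (0:Int) < c := by omega
      simp only [List.foldl_nil, pvFlush, List.count_nil, List.not_mem_nil, Option.getD_some]
      by_cases h : c < mc
      · rw [if_pos ⟨h0, h⟩, PySem.Set.mem_add]
        constructor
        · rintro (h1 | h2)
          · exact Or.inl h1
          · exact Or.inr (Or.inl ⟨h2, by push_cast; omega⟩)
        · rintro (h1 | ⟨h2, _⟩ | ⟨h3, _, _⟩)
          · exact Or.inl h1
          · exact Or.inr h2
          · exact h3.elim
      · rw [if_neg (fun hh => h hh.2)]
        constructor
        · exact fun h1 => Or.inl h1
        · rintro (h1 | ⟨_, h3⟩ | ⟨h4, _, _⟩)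
          · exact h1
          · exact absurd h3 (by push_cast; omega)
          · exact h4.elim
  | cons y t ih =>
      have hyt : ∀ z ∈ t, y ≤ z := (List.pairwise_cons.mp hs).1
      have ht : t.Pairwise (· ≤ ·) := (List.pairwise_cons.mp hs).2
      have hay : a ≤ y := ha y (List.mem_cons_self ..)
      by_cases hya : y = a
      · -- run continues
        subst hya
        simp only [List.foldl_cons, pvStep]
        rw [if_pos (by simp)]
        rw [ih ht y (c+1) (by omega) (by intro z hz; exact le_trans hay (hyt z hz)) rare]
        simp only [List.mem_cons]
        constructor
        · rintro (h1 | ⟨h2, h3⟩ | ⟨h4, h5, h6⟩)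
          · exact Or.inl h1
          · refine Or.inr (Or.inl ⟨h2, ?_⟩)
            subst h2
            simp only [List.count_cons_self] at *
            push_cast at h3 ⊢; omega
          · refine Or.inr (Or.inr ⟨Or.inr h4, h5, ?_⟩)
            rwa [List.count_cons_of_ne (Ne.symm h5)]
        · rintro (h1 | ⟨h2, h3⟩ | ⟨h4, h5, h6⟩)
          · exact Or.inl h1
          · refine Or.inr (Or.inl ⟨h2, ?_⟩)
            subst h2
            simp only [List.count_cons_self] at *
            push_cast at h3 ⊢; omega
          · rcases h4 with h4 | h4
            · exact absurd h4 h5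
            · refine Or.inr (Or.inr ⟨h4, h5, ?_⟩)
              rwa [List.count_cons_of_ne (Ne.symm h5)] at h6
      · -- run ends: y ≠ a, hence a < y and a appears in neither y nor t
        have hlt : a < y := lt_of_le_of_ne hay (fun h => hya h.symm)
        have hanott : a ∉ (y :: t) := by
          intro hmem
          rcases List.mem_cons.mp hmem with h | h
          · exact hya h.symm
          · exact absurd (hyt a h) (not_le.mpr hlt)
        simp only [List.foldl_cons, pvStep]
        rw [if_neg (by simp [fun h : y = a => hya h])]
        have h0 : (0:Int) < c := by omega
        rw [ih ht y 1 le_rfl hyt _]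
        have hcount_a : (y :: t).count a = 0 := List.count_eq_zero.mpr hanott
        have hrare : ∀ z, z ∈ (if 0 < c ∧ c < mc then PySem.Set.add rare ((some a).getD "") else rare) ↔
            z ∈ rare ∨ (z = a ∧ c < mc) := by
          intro z
          by_cases h : c < mc
          · simp [h0, h, PySem.Set.mem_add, Option.getD]
          · simp [h0, h]
        rw [hrare]
        simp only [List.mem_cons, hcount_a]
        constructor
        · rintro ((h1 | ⟨h2, h3⟩) | ⟨h4, h5⟩ | ⟨h6, h7, h8⟩)
          · exact Or.inl h1
          · exact Or.inr (Or.inl ⟨h2, by omega⟩)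
          · subst h4
            refine Or.inr (Or.inr ⟨Or.inl rfl, ne_of_gt hlt, ?_⟩)
            simp only [List.count_cons_self]
            push_cast; omega
          · have hxy : a < x := lt_of_lt_of_le hlt (hyt x h6)
            refine Or.inr (Or.inr ⟨Or.inr h6, ne_of_gt hxy, ?_⟩)
            rwa [List.count_cons_of_ne (Ne.symm h7)]
        · rintro (h1 | ⟨h2, h3⟩ | ⟨h4, h5, h6⟩)
          · exact Or.inl (Or.inl h1)
          · subst h2
            exact Or.inl (Or.inr ⟨rfl, by push_cast at h3; omega⟩)
          · rcases h4 with h4 | h4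
            · subst h4
              refine Or.inr (Or.inl ⟨rfl, ?_⟩)
              simp only [List.count_cons_self] at h6
              push_cast at h6 ⊢; omega
            · by_cases hxy2 : x = y
              · subst hxy2
                refine Or.inr (Or.inl ⟨rfl, ?_⟩)
                simp only [List.count_cons_self] at h6
                push_cast at h6 ⊢; omega
              · refine Or.inr (Or.inr ⟨h4, hxy2, ?_⟩)
                rwa [List.count_cons_of_ne (Ne.symm hxy2)] at h6

-- the scan over a whole sorted list computes exactly the rare labels
theorem pv_rare_char (mc : Int) (s : List String) (hs : s.Pairwise (· ≤ ·)) (x : String) :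
    (x ∈ pvFlush mc (s.foldl (pvStep mc) (PySem.Set.ofList [], none, 0)) ↔
      x ∈ s ∧ (s.count x : Int) < mc) := by
  cases s with
  | nil => simp [pvFlush]
  | cons y t =>
      have hyt : ∀ z ∈ t, y ≤ z := (List.pairwise_cons.mp hs).1
      have ht : t.Pairwise (· ≤ ·) := (List.pairwise_cons.mp hs).2
      simp only [List.foldl_cons, pvStep]
      rw [if_neg (by simp)]
      rw [show (if (0:Int) < 0 ∧ (0:Int) < mc then PySem.Set.add (PySem.Set.ofList []) ((none : Option String).getD "") else PySem.Set.ofList []) = PySem.Set.ofList [] by simp]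
      rw [pv_run_invariant mc t ht y 1 le_rfl hyt _]
      have hempty : x ∉ PySem.Set.ofList ([] : List String) := by
        rw [PySem.Set.mem_ofList]; exact List.not_mem_nil
      rw [List.mem_cons]
      constructor
      · rintro (h0 | ⟨h1, h2⟩ | ⟨h3, h4, h5⟩)
        · exact absurd h0 hempty
        · subst h1
          refine ⟨Or.inl rfl, ?_⟩
          simp only [List.count_cons_self]
          push_cast; omega
        · exact ⟨Or.inr h3, by rwa [List.count_cons_of_ne (Ne.symm h4)]⟩
      · rintro ⟨h1 | h1, h2⟩
        · subst h1
          refine Or.inr (Or.inl ⟨rfl, ?_⟩)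
          simp only [List.count_cons_self] at h2
          push_cast at h2 ⊢; omega
        · by_cases hxy : x = y
          · subst hxy
            refine Or.inr (Or.inl ⟨rfl, ?_⟩)
            simp only [List.count_cons_self] at h2
            push_cast at h2 ⊢; omega
          · exact Or.inr (Or.inr ⟨h1, hxy, by rwa [List.count_cons_of_ne (Ne.symm hxy)] at h2⟩)

-- ===== VERDICT (by name: the statement is the Claim_ definition above) =====
theorem prepare_stratify_labels_spec : Claim_equal_prepare_stratify_labels := by
  intro labels min_count _
  unfold Spec_prepare_stratify_labels prepare_stratify_labels prepare_stratify_labels_alt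
  -- A's loop is a map keyed by the Counter = List.count
  have hstep : ∀ (acc : List String) (label : String),
      (if (PySem.Dict.counter labels).getD label 0 < min_count then acc ++ ["RARE_CLASS"]
       else acc ++ [label]) =
      acc ++ [if (labels.count label : Int) < min_count then "RARE_CLASS" else label] := by
    intro acc label
    simp only [PySem.Dict.getD_counter]
    by_cases h : (labels.count label : Int) < min_count
    · simp [h]
    · simp [h]
  simp only [hstep, PySem.List.foldl_append_singleton_eq_map, List.nil_append]
  -- B's rare set holds exactly the labels with count < min_count
  apply List.map_congr_left
  intro x hx
  have hchar := pv_rare_char min_count (PySem.List.sorted labels (fun x => x) false)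
    (by simpa using PySem.List.sorted_pairwise labels (fun x => x)) x
  rw [PySem.List.mem_sorted labels (fun x => x) false x] at hchar
  rw [(PySem.List.sorted_perm labels (fun x => x) false).count_eq x] at hchar
  by_cases h : (labels.count x : Int) < min_count
  · rw [if_pos h, if_pos (by rw [PySem.Set.contains_iff]; exact hchar.mpr ⟨hx, h⟩)]
  · rw [if_neg h, if_neg ?_]
    simp only [PySem.Set.contains_iff] at *
    intro hc
    exact h (hchar.mp hc).2
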